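-- pv_equiv track=rewrite | github.com/LongjuBai/Coding_agent_token_consumption_analysis | analysis/phase_level_analysis/token_count_analysis.py | calculate_token_counts
-- ===== SOURCE A (Python) =====
-- TOKEN_TYPES = ['prompt_tokens_noncached', 'completion_tokens', 'cache_creation_input_tokens', 'cache_read_input_tokens']
--
-- def calculate_token_counts(phase_rounds):
--     """
--     Calculate absolute counts of each token type within a phase.
--     Returns counts for each token type.
--     """
--     if not phase_rounds:
--         return {token_type: {'count': 0} for token_type in TOKEN_TYPES}
--
--     # Sum up all tokens in this phase
--     total_tokens = {}
--     for token_type in TOKEN_TYPES: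
--         if token_type == 'prompt_tokens_noncached':
--             # Calculate prompt_tokens - cache_read_input_tokens for each round
--             total_tokens[token_type] = sum(
--                 round_data.get('prompt_tokens', 0) - round_data.get('cache_read_input_tokens', 0)
--                 for round_data in phase_rounds
--             )
--         else:
--             total_tokens[token_type] = sum(round_data.get(token_type, 0) for round_data in phase_rounds)
--
--     # Return counts
--     counts = {}
--     for token_type in TOKEN_TYPES:
--         counts[token_type] = {
--             'count': total_tokens[token_type]
--         }
--
--     return counts
-- ===== SOURCE B (Python) =====
-- TOKEN_TYPES = ['prompt_tokens_noncached', 'completion_tokens', 'cache_creation_input_tokens', 'cache_read_input_tokens']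
--
-- def calculate_token_counts(phase_rounds):
--     noncached = completion = creation = cache_read = 0
--     for round_data in phase_rounds:
--         noncached += round_data.get('prompt_tokens', 0) - round_data.get('cache_read_input_tokens', 0)
--         completion += round_data.get('completion_tokens', 0)
--         creation += round_data.get('cache_creation_input_tokens', 0)
--         cache_read += round_data.get('cache_read_input_tokens', 0)
--     return {
--         'prompt_tokens_noncached': {'count': noncached},
--         'completion_tokens': {'count': completion},
--         'cache_creation_input_tokens': {'count': creation},
--         'cache_read_input_tokens': {'count': cache_read},
--     }
-- ===== Notes on version B (the rewrite author's own statement) =====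
-- stated objective: simpler
-- what changed: Replaces A's empty-list special case and four separate scans of phase_rounds (one per token type, driven by a loop over TOKEN_TYPES plus a second dict-building pass) with a single pass maintaining four accumulators, building the result dict once; the empty-list guard is subsumed.
import Mathlib
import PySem

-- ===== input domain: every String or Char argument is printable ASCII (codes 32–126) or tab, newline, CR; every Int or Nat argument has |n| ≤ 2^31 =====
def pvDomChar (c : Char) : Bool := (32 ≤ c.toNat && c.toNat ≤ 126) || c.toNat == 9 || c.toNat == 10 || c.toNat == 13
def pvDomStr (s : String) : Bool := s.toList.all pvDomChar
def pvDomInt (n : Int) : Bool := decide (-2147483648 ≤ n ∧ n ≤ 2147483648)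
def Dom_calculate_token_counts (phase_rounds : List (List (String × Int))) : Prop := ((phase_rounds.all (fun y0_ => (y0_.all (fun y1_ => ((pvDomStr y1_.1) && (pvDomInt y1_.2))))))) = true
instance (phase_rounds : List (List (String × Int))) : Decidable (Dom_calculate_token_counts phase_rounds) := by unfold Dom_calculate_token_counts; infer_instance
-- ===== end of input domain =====

-- B replaces A's four separate scans of phase_rounds (plus empty-list guard and second
-- dict-building pass) with a single pass maintaining four accumulators: simpler.

def TOKEN_TYPES : List String :=
  ["prompt_tokens_noncached", "completion_tokens", "cache_creation_input_tokens", "cache_read_input_tokens"]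

-- round_data.get(k, 0): first-match lookup on the association list, default 0
def rdGet (rd : List (String × Int)) (k : String) : Int :=
  PySem.Dict.getD (PySem.Dict.mk rd) k 0

-- ===== PORT A =====
def calculate_token_counts (phase_rounds : List (List (String × Int))) : List (String × List (String × Int)) :=
  if phase_rounds = [] then
    (TOKEN_TYPES.foldl (fun d t => PySem.Dict.insert d t [("count", (0 : Int))]) PySem.Dict.empty).items
  else
    let total_tokens : PySem.Dict String Int :=
      TOKEN_TYPES.foldl (fun acc token_type =>
        if token_type == "prompt_tokens_noncached" then
          PySem.Dict.insert acc token_type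
            (phase_rounds.foldl (fun s round_data =>
              s + (rdGet round_data "prompt_tokens" - rdGet round_data "cache_read_input_tokens")) 0)
        else
          PySem.Dict.insert acc token_type
            (phase_rounds.foldl (fun s round_data => s + rdGet round_data token_type) 0)) PySem.Dict.empty
    -- total_tokens[token_type]: the key is always present (getD's default is never used)
    (TOKEN_TYPES.foldl (fun counts token_type =>
      PySem.Dict.insert counts token_type
        [("count", PySem.Dict.getD total_tokens token_type 0)]) PySem.Dict.empty).items

-- ===== PORT B =====
def calculate_token_counts_alt (phase_rounds : List (List (String × Int))) : List (String × List (String × Int)) :=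
  let acc :=
    phase_rounds.foldl (fun (s : Int × Int × Int × Int) round_data =>
      (s.1 + (rdGet round_data "prompt_tokens" - rdGet round_data "cache_read_input_tokens"),
       s.2.1 + rdGet round_data "completion_tokens",
       s.2.2.1 + rdGet round_data "cache_creation_input_tokens",
       s.2.2.2 + rdGet round_data "cache_read_input_tokens")) (0, 0, 0, 0)
  [("prompt_tokens_noncached", [("count", acc.1)]),
   ("completion_tokens", [("count", acc.2.1)]),
   ("cache_creation_input_tokens", [("count", acc.2.2.1)]),
   ("cache_read_input_tokens", [("count", acc.2.2.2)])]

-- ===== PRECONDITION & SPEC =====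
def Spec_calculate_token_counts (phase_rounds : List (List (String × Int))) (out : List (String × List (String × Int))) : Prop := out = calculate_token_counts_alt phase_rounds
instance (phase_rounds : List (List (String × Int))) (out : List (String × List (String × Int))) : Decidable (Spec_calculate_token_counts phase_rounds out) := by unfold Spec_calculate_token_counts; infer_instance

-- ===== CLAIM (what is proved, stated in full; the proofs are below) =====
def Claim_equal_calculate_token_counts : Prop := ∀ (phase_rounds : List (List (String × Int))), Dom_calculate_token_counts phase_rounds → Spec_calculate_token_counts phase_rounds (calculate_token_counts phase_rounds)

-- ===== LEMMAS AND PROOFS =====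

-- B's single fold computes the four per-type sums that A computes by separate scans.
theorem alt_fold_eq (pr : List (List (String × Int))) (a b c d : Int) :
    pr.foldl (fun (s : Int × Int × Int × Int) rd =>
      (s.1 + (rdGet rd "prompt_tokens" - rdGet rd "cache_read_input_tokens"),
       s.2.1 + rdGet rd "completion_tokens",
       s.2.2.1 + rdGet rd "cache_creation_input_tokens",
       s.2.2.2 + rdGet rd "cache_read_input_tokens")) (a, b, c, d)
    = (pr.foldl (fun s rd => s + (rdGet rd "prompt_tokens" - rdGet rd "cache_read_input_tokens")) a,
       pr.foldl (fun s rd => s + rdGet rd "completion_tokens") b,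
       pr.foldl (fun s rd => s + rdGet rd "cache_creation_input_tokens") c,
       pr.foldl (fun s rd => s + rdGet rd "cache_read_input_tokens") d) := by
  induction pr generalizing a b c d with
  | nil => rfl
  | cons h t ih => simp [ih]

-- ===== VERDICT (by name: the statement is the Claim_ definition above) =====
theorem calculate_token_counts_spec : Claim_equal_calculate_token_counts := by
  intro pr _
  show calculate_token_counts pr = calculate_token_counts_alt pr
  unfold calculate_token_counts calculate_token_counts_alt
  rcases pr with _ | ⟨h, t⟩
  · decide
  · simp [TOKEN_TYPES, alt_fold_eq, PySem.Dict.insert, PySem.Dict.getD,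
          PySem.Dict.get?, PySem.Dict.empty]
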